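/- GENERATED by mk_final_copies.py from the proof of the farm's unit `decode_residue.1c` (farm:decode_residue.1c.2: Lemmas.lean) as the
   re-elaboration sweep compiled it — do not edit. -/
import Asan.CheckWalk
import Vorbis.Spec.Units.decode_residue_1c

/-!
  Lemmas of the proof unit `decode_residue.1c` (0x10ed48 – 0x10edc5, the dead `alloca` arm 0x10ee11 – 0x10ee34): from `ret8`
  (assertion `At1c` of Vorbis/Spec/DecodeResidue1.lean) over the `div` (`part_read`), three check sites inside `*f` and the call of
  `setup_temp_malloc` to `cut1` (assertion `At1d`).

  * helper lemmas (from the head start of an earlier worker): `live_sub_frames'`, `read_after_prologue`, `fact_of_addr`, `udiv32`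
    (the model's unsigned `div` with `edx = 0`), `objEq_off` / `objEq_apart` (`ObjEq ws` of `*f` from a `SameExcept`), `atDiv`;
  * `alloc_rsi_val`, `alloc_r13_val`: the 32-bit request `((part_read + 1)·C)·8` and `8·part_read` as numbers (no wrap);
  * `alloc_fits`: T3 + ADO, the request fits;
  * `exit_at1d`: the exit assertion `At1d` from the facts about the state after the callee returned (no walking: 13 s);
  * `alloc_walk`: the walk (two nested walks: `ret8 → atDiv`, where the divisor is named because the walker does not read a
    `div`'s memory operand through `w_mem`; `atDiv → cut1`); the `alloca` arm is pruned by the walker (`alloc_buffer = B ≠ 0`).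
-/

open X86 X86.User Asan Vorbis Vorbis.Spec Vorbis.Spec.DecodeResidue

set_option maxRecDepth 4000
set_option maxHeartbeats 4000000

namespace Vorbis.Spec.decode_residue_1c

/-- Every live object at the entry is live inside the function (the own frame's objects were added). -/
theorem live_sub_frames' (g : G) : ∀ o, o ∈ stackObjs g.frames ++ g.others → o ∈ stackObjs g.frames' ++ g.others := by
  intro o ho
  unfold G.frames'
  rw [stackObjs_cons]
  rcases List.mem_append.mp ho with h | h
  · exact List.mem_append_left _ (List.mem_append_right _ h)
  · exact List.mem_append_right _ h


/-- **A read off the stack region and inside the data space is not touched by the prologue**: the prologue wrote its own stack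
frame and 12 shadow bytes only (`AtP.same`). -/
theorem read_after_prologue {m m' : Mem} {sp : Nat} (hsame : Mem.SameExcept [⟨sp - 256, sp⟩, shadowSpan (sp - 152) (sp - 56)] m m')
    (hlo : 0x700000 + 848 ≤ sp) (hhi : sp + 8 ≤ 0x800000) (a : Word) (k : Nat)
    (hin : a.toNat + k ≤ 0xC00000) (hst : a.toNat + k ≤ 0x700000 ∨ 0x800000 ≤ a.toNat) :
    m'.readLE a k = m.readLE a k := by
  apply hsame.readLE a k (by omega)
  intro w hw
  simp only [List.mem_cons, List.mem_nil_iff, or_false] at hw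
  rcases hw with rfl | rfl
  · simp only []
    omega
  · unfold shadowSpan
    simp only []
    omega

/-- A load of the walk in the memory after the prologue is the typed read of the entry memory: the address is the number `n`. -/
theorem fact_of_addr {m m' : Mem} {sp : Nat} (hsame : Mem.SameExcept [⟨sp - 256, sp⟩, shadowSpan (sp - 152) (sp - 56)] m m')
    (hlo : 0x700000 + 848 ≤ sp) (hhi : sp + 8 ≤ 0x800000) {a : Word} {n : Nat} (k : Nat) (ha : a = addr n)
    (hin : n + k ≤ 0xC00000) (hst : n + k ≤ 0x700000 ∨ 0x800000 ≤ n) : m'.readLE a k = m.readLE (addr n) k := by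
  subst ha
  have e : (addr n).toNat = n := toNat_addr _ (by omega)
  exact read_after_prologue hsame hlo hhi _ k (by rw [e]; exact hin) (by rw [e]; exact hst)

/-- `mov edx, 0 ; div r/m32` with a positive divisor (0x10ed4a, 0x10ed4f; C 2142 `n_read / r->part_size`): no `#DE`, the quotient
and the remainder are those of the natural numbers. -/
theorem udiv32 (x d : BitVec 32) (hd1 : 1 ≤ d.toNat) :
    Alu.div false (0#32) x d = some (BitVec.ofNat 32 (x.toNat / d.toNat), BitVec.ofNat 32 (x.toNat % d.toNat)) := by
  have hd0 : (d == 0) = false := by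
    rw [beq_eq_false_iff_ne]
    intro h
    rw [h] at hd1
    exact absurd hd1 (by decide)
  have hD : ((0 : BitVec 32) ++ x).toNat = x.toNat := by
    rw [BitVec.toNat_append]
    show 0 <<< 32 ||| x.toNat = x.toNat
    rw [Nat.zero_shiftLeft, Nat.zero_or]
  have hE : (BitVec.zeroExtend (32 + 32) d).toNat = d.toNat := by
    have := d.isLt
    simp only [BitVec.truncate_eq_setWidth, BitVec.toNat_setWidth]
    omega
  have hq : (((0 : BitVec 32) ++ x) / (BitVec.zeroExtend (32 + 32) d)).toNat = x.toNat / d.toNat := by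
    rw [BitVec.toNat_udiv, hD, hE]
  have hr : (((0 : BitVec 32) ++ x) % (BitVec.zeroExtend (32 + 32) d)).toNat = x.toNat % d.toNat := by
    rw [BitVec.toNat_umod, hD, hE]
  have hqlt : x.toNat / d.toNat < 2 ^ 32 := Nat.lt_of_le_of_lt (Nat.div_le_self _ _) x.isLt
  unfold Alu.div
  simp only [hd0, Bool.false_eq_true, if_false]
  generalize ((0 : BitVec 32) ++ x) / (BitVec.zeroExtend (32 + 32) d) = q at hq
  generalize ((0 : BitVec 32) ++ x) % (BitVec.zeroExtend (32 + 32) d) = r at hr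
  have e0 : BitVec.extractLsb' 32 32 q = 0 := by
    apply BitVec.eq_of_toNat_eq
    rw [BitVec.extractLsb'_toNat, hq, Nat.shiftRight_eq_div_pow, Nat.div_eq_of_lt hqlt]
    rfl
  have e1 : BitVec.setWidth 32 q = BitVec.ofNat 32 (x.toNat / d.toNat) := by
    apply BitVec.eq_of_toNat_eq
    rw [BitVec.toNat_setWidth, hq, BitVec.toNat_ofNat]
  have e2 : BitVec.setWidth 32 r = BitVec.ofNat 32 (x.toNat % d.toNat) := by
    apply BitVec.eq_of_toNat_eq
    rw [BitVec.toNat_setWidth, hr, BitVec.toNat_ofNat]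
  rw [e0, e1, e2]
  simp only [bne_self_eq_false, Bool.false_eq_true, if_false]

/-- **The windows `ws` of `*f` read the same** when the memory changed only inside spans that do not meet `*f`, or lie inside
`temp_offset` (`[f + 132, f + 136)`), and no window meets `[132, 136)`. -/
theorem objEq_off {m m' : Mem} {f : Nat} {spans : List Span} (hs : Mem.SameExcept spans m m') (hf : f + 1808 ≤ 0xC00000)
    (hd : ∀ s, s ∈ spans → s.hi ≤ f ∨ f + 1808 ≤ s.lo ∨ (f + 132 ≤ s.lo ∧ s.hi ≤ f + 136)) (ws : Wins) (hb : WinsBelow ws 1808)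
    (hw : ∀ w, w ∈ ws → w.2 ≤ 132 ∨ 136 ≤ w.1) : ObjEq ws m f m' f := by
  apply ObjEq.of_sameExcept hs
  · intro w hw'
    have := hb w hw'
    omega
  · intro w hw' s hsp
    have h1 := hb w hw'
    have h2 := hd s hsp
    have h3 := hw w hw'
    omega

/-- **The windows `ws` of `*f` read the same** when the memory changed only inside spans that do not meet `*f`. -/
theorem objEq_apart {m m' : Mem} {f : Nat} {spans : List Span} (hs : Mem.SameExcept spans m m') (hf : f + 1808 ≤ 0xC00000)
    (hd : ∀ s, s ∈ spans → s.hi ≤ f ∨ f + 1808 ≤ s.lo) (ws : Wins) (hb : WinsBelow ws 1808) : ObjEq ws m f m' f := by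
  apply ObjEq.of_sameExcept hs
  · intro w hw
    have := hb w hw
    omega
  · intro w hw s hsp
    have h1 := hb w hw
    have h2 := hd s hsp
    omega

/-- 0x10ed4f: the `div` (the walker does not read the memory operand of a `div` through `w_mem`: the walk stops here, the divisor
is named, and the walk goes on). -/
abbrev atDiv : Word := Vorbis.L.decode_residue.ret8 + 7

/-- the request of `setup_temp_malloc` as a number -/
theorem alloc_rsi_val (q C : Nat) (hq : q ≤ 8192) (hC : C ≤ 16) :
    (Word.ofBV (BitVec.setWidth 32 (Word.ofBV (Word.part Width.w32
      (Word.ofBV (BitVec.signExtend 64 (BitVec.ofNat 32 (q % 4294967296))) + 1) * BitVec.ofNat 32 C) * 8).toBitVec)).toNat % 2 ^ 32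
      = C * (8 + 8 * q) := by
  have hq1 : q % 4294967296 = q := Nat.mod_eq_of_lt (by omega)
  have hqn : (BitVec.ofNat 32 q).toNat = q := by
    rw [BitVec.toNat_ofNat]
    omega
  have hCn : (BitVec.ofNat 32 C).toNat = C := by
    rw [BitVec.toNat_ofNat]
    omega
  have hmul : (q + 1) * C ≤ 8193 * 16 := Nat.mul_le_mul (by omega) hC
  rw [hq1, toNat_ofBV32, BitVec.toNat_setWidth, UInt64.toNat_toBitVec, UInt64.toNat_mul, toNat_ofBV32, BitVec.toNat_mul,
    toNat_part32, UInt64.toNat_add, toNat_sext32 _ (by rw [hqn]; omega), hqn, hCn]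
  have e1 : (1 : Word).toNat = 1 := rfl
  have e8 : (8 : Word).toNat = 8 := rfl
  rw [e1, e8]
  have e2 : (q + 1) % 2 ^ 64 % 2 ^ 32 = q + 1 := by omega
  rw [e2]
  have e3 : (q + 1) * C % 2 ^ 32 = (q + 1) * C := Nat.mod_eq_of_lt (by omega)
  rw [e3]
  have e4 : C * (8 + 8 * q) = (q + 1) * C * 8 := by
    rw [Nat.mul_comm (q + 1) C, Nat.mul_assoc]
    congr 1
    omega
  rw [e4]
  omega

/-- `lea r13d, [rax*8]` -/
theorem alloc_r13_val (q : Nat) (hq : q ≤ 8192) :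
    Word.ofBV (BitVec.setWidth 32 (Word.ofBV (BitVec.ofNat 32 (q % 4294967296)) * 8).toBitVec) = UInt64.ofNat (8 * q) := by
  have hq1 : q % 4294967296 = q := Nat.mod_eq_of_lt (by omega)
  have hqn : (BitVec.ofNat 32 q).toNat = q := by
    rw [BitVec.toNat_ofNat]
    omega
  apply UInt64.toNat_inj.mp
  rw [hq1, toNat_ofBV32, BitVec.toNat_setWidth, UInt64.toNat_toBitVec, UInt64.toNat_mul, toNat_ofBV32, hqn, UInt64.toNat_ofNat']
  have e8 : (8 : Word).toNat = 8 := rfl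
  rw [e8]
  omega

/-- T3 + ADO: the request `g.sz` of segment 1c fits (`temp_alloc_ok`), and the block is TB. -/
theorem alloc_fits {u₀ : State} {g : G} (he : Entered u₀ g) :
    g.A.Fits g.sz ∧ r8 g.sz ≤ stb_vorbis.temp_memory_required g.e.mem g.f := by
  have hv := he.pre.vorbis
  have hT1 : T1 g.e.mem g.f := hv.temp
  have hR : ResidueOK g.Blk g.e.mem g.f := hv.residue
  have hreq := T3_decode_residue hT1 hR he.pre.args.rn_lt he.pre.args.n_le
  have hado := he.pre.ado
  have h8 : r8 g.sz ≤ stb_vorbis.temp_memory_required g.e.mem g.f := r8_le_of_le hreq hado.tmr8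
  exact ⟨(temp_alloc_ok hado h8).1, h8⟩

/-- **The exit assertion `At1d`** from the facts about the state after `setup_temp_malloc` returned. -/
theorem exit_at1d {u₀ : State} {g : G} (hent : Entered u₀ g) {v s : State} (hat : At1c u₀ g v)
    (hrip : s.rip = L.decode_residue.cut1)
    (hrsp : s.reg .rsp = g.e.reg .rsp - 248)
    (hrbp : s.reg .rbp = g.e.reg .rsp - 8)
    (hrax : (s.reg .rax).toNat = g.TB.base)
    (hr12 : s.reg .r12 = UInt64.ofNat g.C)
    (hr13 : s.reg .r13 = UInt64.ofNat (8 * g.PRD))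
    (hr14 : s.reg .r14 = UInt64.ofNat g.r)
    (hr15 : s.reg .r15 = UInt64.ofNat g.tap)
    (hcode : CodeOK u₀ s.mem) (hinv : abiInv s)
    (hsF : Mem.SameExcept [⟨g.RA - 848, g.RA - 248⟩, ⟨g.RA - 196, g.RA - 192⟩, ⟨g.RA - 184, g.RA - 176⟩,
       ⟨g.f + 132, g.f + 136⟩, shadowSpan g.TB.base (g.TB.base + g.sz)] v.mem s.mem)
    (k_prd : s.mem.readLE (g.e.reg .rsp - 196) 4 = g.PRD)
    (k_f : UInt64.ofNat (s.mem.readLE (g.e.reg .rsp - 184) 8) = g.e.reg .rdi)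
    (hok : ArenaOK g.A' g.others' s.mem g.f)
    (hsh : ShadowInv g.others' g.frames' (g.RA - 248) s.mem) : At1d u₀ g s := by
  have hroom := hent.room
  have hpre := hent.pre
  have hRA : g.RA = (g.e.reg .rsp).toNat := rfl
  obtain ⟨hfit, hsz8⟩ := alloc_fits hent
  have hado := hent.ado
  -- where `*f` is
  have hob : g.Blk (objBlock g.f) := hent.vorbis.obj
  have hobin := hpre.env.ok.inside _ hob
  have hobst := hpre.free.offStack _ hob
  simp only [vblock, voff] at hobin hobst
  -- where the temp block is
  have htb : g.A'.TBlock g.TB.base g.TB.size := g.A.tblock_pushTemp g.sz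
  have htboff := hok.tblock_off htb
  have htbrange := hok.tblock_range htb
  have eB : g.A'.B = g.A.B := rfl
  have eL : g.A'.L = g.A.L := rfl
  have eTBs : g.TB.size = g.sz := rfl
  rw [eB, eL, eTBs] at htbrange
  rw [eTBs] at htboff
  have hAR1 := hado.ok.AR1
  have hAR2 := hado.ok.AR2
  have hle8 := le_r8 g.sz
  -- the windows written since `ret8`
  have hwin : ∀ w : Span, w ∈ [(⟨g.RA - 848, g.RA - 248⟩ : Span), ⟨g.RA - 196, g.RA - 192⟩, ⟨g.RA - 184, g.RA - 176⟩,
       ⟨g.f + 132, g.f + 136⟩, shadowSpan g.TB.base (g.TB.base + g.sz)] →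
      (w.hi ≤ g.RA - 248 ∨ g.RA ≤ w.lo ∨ (g.RA - 196 ≤ w.lo ∧ w.hi ≤ g.RA - 192) ∨ (g.RA - 184 ≤ w.lo ∧ w.hi ≤ g.RA - 176)) ∧
      (w.hi ≤ g.f ∨ g.f + 1808 ≤ w.lo ∨ (g.f + 132 ≤ w.lo ∧ w.hi ≤ g.f + 136)) := by
    intro w hw
    simp only [List.mem_cons, List.mem_nil_iff, or_false] at hw
    rcases hw with rfl | rfl | rfl | rfl | rfl
    · simp only []
      omega
    · simp only []
      omega
    · simp only []
      omega
    · simp only []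
      omega
    · unfold shadowSpan
      simp only []
      omega
  have hkeep : ∀ (a : Word) (n : Nat), g.RA - 248 ≤ a.toNat → a.toNat + n ≤ g.RA →
      (a.toNat + n ≤ g.RA - 196 ∨ g.RA - 192 ≤ a.toNat) → (a.toNat + n ≤ g.RA - 184 ∨ g.RA - 176 ≤ a.toNat) →
      s.mem.readLE a n = v.mem.readLE a n := by
    intro a n h1 h2 h3 h4
    apply hsF.readLE a n (by omega)
    intro w hw
    have := (hwin w hw).1
    omega
  -- the spans written since the entry, and that they miss what `Bits`, `ADO` and μ read
  have hsE : Mem.SameExcept [⟨g.RA - 256, g.RA⟩, shadowSpan (g.RA - 152) (g.RA - 56), ⟨g.RA - 848, g.RA - 248⟩,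
       ⟨g.RA - 196, g.RA - 192⟩, ⟨g.RA - 184, g.RA - 176⟩,
       ⟨g.f + 132, g.f + 136⟩, shadowSpan g.TB.base (g.TB.base + g.sz)] g.e.mem s.mem := by
    refine (hat.same.mono ?_).trans (hsF.mono ?_)
    · intro w hw a h1 h2
      simp only [List.mem_cons, List.mem_nil_iff, or_false] at hw
      rcases hw with rfl | rfl
      · exact ⟨_, List.mem_cons_self, h1, h2⟩
      · exact ⟨_, List.mem_cons_of_mem _ List.mem_cons_self, h1, h2⟩
    · intro w hw a h1 h2
      exact ⟨w, List.mem_cons_of_mem _ (List.mem_cons_of_mem _ hw), h1, h2⟩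
  have hoffE : ∀ w : Span, w ∈ [(⟨g.RA - 256, g.RA⟩ : Span), shadowSpan (g.RA - 152) (g.RA - 56), ⟨g.RA - 848, g.RA - 248⟩,
       ⟨g.RA - 196, g.RA - 192⟩, ⟨g.RA - 184, g.RA - 176⟩,
       ⟨g.f + 132, g.f + 136⟩, shadowSpan g.TB.base (g.TB.base + g.sz)] →
      w.hi ≤ g.f ∨ g.f + 1808 ≤ w.lo ∨ (g.f + 132 ≤ w.lo ∧ w.hi ≤ g.f + 136) := by
    intro w hw
    simp only [List.mem_cons, List.mem_nil_iff, or_false] at hw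
    rcases hw with rfl | rfl | hw
    · simp only []
      omega
    · unfold shadowSpan
      simp only []
      omega
    · exact (hwin w (by simp only [List.mem_cons, List.mem_nil_iff, or_false]; exact hw)).2
  have htmr : stb_vorbis.temp_memory_required s.mem g.f = stb_vorbis.temp_memory_required g.e.mem g.f := by
    have he := objEq_off hsE hobin.2 hoffE [(12, 16)] (by decide) (by decide)
    simp only [vacc, voff]
    exact he.u32 12 (by decide)
  refine ⟨hrip, hrsp, hrbp, ?rax, hr12, hr13, hr14, hr15, hcode, hinv, ?s_rbp, ?s_r15, ?s_r14, ?s_r13, ?s_r12, ?s_rbx, k_f,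
    ?fr_rb, ?fr_ch, k_prd, ?fr_w, ?fr_rtype, ?fr_si, ?sl_n, ?sl_dnd, ?same, hsh, ?bits, ?busy, ?mu_le⟩
  case rax =>
    apply UInt64.toNat_inj.mp
    rw [hrax, UInt64.toNat_ofNat']
    omega
  case s_rbp =>
    rw [hkeep _ _ (by u_omega) (by u_omega) (by u_omega) (by u_omega)]
    exact hat.s_rbp
  case s_r15 =>
    rw [hkeep _ _ (by u_omega) (by u_omega) (by u_omega) (by u_omega)]
    exact hat.s_r15
  case s_r14 =>
    rw [hkeep _ _ (by u_omega) (by u_omega) (by u_omega) (by u_omega)]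
    exact hat.s_r14
  case s_r13 =>
    rw [hkeep _ _ (by u_omega) (by u_omega) (by u_omega) (by u_omega)]
    exact hat.s_r13
  case s_r12 =>
    rw [hkeep _ _ (by u_omega) (by u_omega) (by u_omega) (by u_omega)]
    exact hat.s_r12
  case s_rbx =>
    rw [hkeep _ _ (by u_omega) (by u_omega) (by u_omega) (by u_omega)]
    exact hat.s_rbx
  case fr_rb =>
    rw [hkeep _ _ (by u_omega) (by u_omega) (by u_omega) (by u_omega)]
    exact hat.fr_rb
  case fr_ch =>
    rw [hkeep _ _ (by u_omega) (by u_omega) (by u_omega) (by u_omega)]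
    exact hat.fr_ch
  case fr_w =>
    rw [hkeep _ _ (by u_omega) (by u_omega) (by u_omega) (by u_omega)]
    exact hat.fr_w
  case fr_rtype =>
    rw [hkeep _ _ (by u_omega) (by u_omega) (by u_omega) (by u_omega)]
    exact hat.fr_rtype
  case fr_si =>
    rw [hkeep _ _ (by u_omega) (by u_omega) (by u_omega) (by u_omega)]
    exact hat.fr_si
  case sl_n =>
    rw [hkeep _ _ (by u_omega) (by u_omega) (by u_omega) (by u_omega)]
    exact hat.sl_n
  case sl_dnd =>
    rw [hkeep _ _ (by u_omega) (by u_omega) (by u_omega) (by u_omega)]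
    exact hat.sl_dnd
  case bits =>
    have hbits : Bits g.Blk g.len g.e.mem g.f := hent.vorbis.bits
    exact hbits.transfer (objEq_off hsE hobin.2 hoffE Bits.wins (by decide) (by decide)) ⟨hbits.OB1, hbits.OB1a⟩ hbits.OBR hbits.S2
  case busy =>
    refine ⟨hok, ?_, ?_, ?_, ?_⟩
    · show (g.A.T - (r8 g.sz + 32), g.sz) :: g.A.temps = [(g.A.T - (r8 g.sz + 32), g.sz)]
      rw [hado.idle]
    · rw [htmr]
      exact hsz8
    · rw [htmr]
      exact hado.tmr8
    · rw [htmr]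
      exact hado.room
  case mu_le =>
    rw [mu_transfer (objEq_off hsE hobin.2 hoffE muWins (by decide) (by decide))]
    exact Nat.le_refl _
  case same =>
    have eTB : g.TB.base = g.A.B + (g.A.T - (r8 g.sz + 32)) := rfl
    unfold Arena.Fits at hfit
    have hmemW : ∀ w : Span, w ∈ DecodeResidue.writes g.A g.e → w ∈ g.spec.footprint g.e := by
      intro w hw
      unfold Spec.footprint
      exact List.mem_cons_of_mem _ hw
    have hstk : (⟨(g.e.reg .rsp).toNat - 848, (g.e.reg .rsp).toNat⟩ : Span) ∈ g.spec.footprint g.e := by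
      unfold Spec.footprint
      exact List.mem_cons_self
    refine hsE.mono ?_
    intro w hw a h1 h2
    simp only [List.mem_cons, List.mem_nil_iff, or_false] at hw
    rcases hw with rfl | rfl | rfl | rfl | rfl | rfl | rfl
    · refine ⟨_, hstk, ?_, ?_⟩
      · simp only [] at h1 ⊢
        omega
      · simp only [] at h2 ⊢
        omega
    · refine ⟨shadowSpan ((g.e.reg .rsp).toNat - 152) ((g.e.reg .rsp).toNat - 56), hmemW _ ?_, h1, h2⟩
      unfold DecodeResidue.writes
      apply List.mem_append_left
      simp only [List.mem_cons, true_or, or_true]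
    · refine ⟨_, hstk, ?_, ?_⟩
      · simp only [] at h1 ⊢
        omega
      · simp only [] at h2 ⊢
        omega
    · refine ⟨_, hstk, ?_, ?_⟩
      · simp only [] at h1 ⊢
        omega
      · simp only [] at h2 ⊢
        omega
    · refine ⟨_, hstk, ?_, ?_⟩
      · simp only [] at h1 ⊢
        omega
      · simp only [] at h2 ⊢
        omega
    · refine ⟨⟨(g.e.reg .rdi).toNat + 132, (g.e.reg .rdi).toNat + 144⟩, hmemW _ ?_, ?_, ?_⟩
      · unfold DecodeResidue.writes
        apply List.mem_append_left
        simp only [List.mem_cons, true_or, or_true]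
      · exact h1
      · have ef : (g.e.reg .rdi).toNat = g.f := rfl
        simp only [] at h2 ⊢
        omega
    · refine ⟨shadowSpan (g.A.B + g.A.S) (g.A.B + g.A.L), hmemW _ ?_, ?_, ?_⟩
      · unfold DecodeResidue.writes
        apply List.mem_append_left
        simp only [List.mem_cons, true_or, or_true]
      · unfold shadowSpan at h1 ⊢
        simp only [] at h1 ⊢
        omega
      · unfold shadowSpan at h2 ⊢
        simp only [] at h2 ⊢
        omega


/-- **Segment .1c**: `part_read = n_read / r->part_size` (0x10ed4f; R5: no `#DE`), its spill `[rbp−0xbc]`, `temp_alloc_point`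
(0x10ed6d), `f->channels` (0x10ed93), the test of `f->alloc.alloc_buffer` (0x10edaf: never NULL, AR5 + AR1),
`setup_temp_malloc(f, (part_read + 1)·C·8)` (0x10edc5; C 2142–2145); the exit assertion `At1d` by `exit_at1d`. -/
theorem alloc_walk {Lay : Layout} (hLay : Lay.hi = 0x1000000) {μ : Microarch} (hμ : UserX.MicroOK μ) {u₀ : State}
    (hcode : HasCodeNat Lay u₀ Vorbis.L.decode_residue.entry Vorbis.Code.code_decode_residue.nat Vorbis.L.decode_residue.size)
    (hld8 : Asan.SmallCheck Lay μ Vorbis.WayInv (Vorbis.CodeOK u₀) [.rax, .rcx, .rdx] 8 Vorbis.L.__asan_load8_noabort.entry)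
    (hld4 : Asan.SmallCheck Lay μ Vorbis.WayInv (Vorbis.CodeOK u₀) [.rax, .rcx, .rdx] 4 Vorbis.L.__asan_load4_noabort.entry)
    (g : G)
    (hstm : Calls Lay μ Vorbis.WayInv (Vorbis.conv u₀) Vorbis.L.setup_temp_malloc.entry (Vorbis.Spec.setup_temp_malloc.spec g.others g.frames' g.A))
    (hent : Entered u₀ g) (v : State) (hat : At1c u₀ g v) :
    ReachVia Lay μ WayInv v (fun v' => At1d u₀ g v') := by
  obtain ⟨e, hge⟩ : ∃ e, g.e = e := ⟨_, rfl⟩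
  have he := hent.entry
  have hpre := hent.pre
  have hRA : g.RA = (e.reg .rsp).toNat := by
    unfold G.RA
    rw [hge]
  have hat0 : At1c u₀ g v := hat
  obtain ⟨w_rip, v_rsp, v_rbp, v_r14, v_rbx, hcodeok, hinvabi, sav_rbp, sav_r15, sav_r14, sav_r13, sav_r12, sav_rbx, fr_f,
    fr_rb, fr_ch, sl_n, sl_dnd, fr_si, fr_rtype, fr_w, hsame, hshadow⟩ := hat
  rw [hge] at he hpre v_rsp v_rbp sav_rbp sav_r15 sav_r14 sav_r13 sav_r12 sav_rbx fr_f fr_rb fr_ch sl_n sl_dnd fr_si fr_rtype fr_w hsame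
  rw [hRA] at hsame hshadow fr_si
  v_entry he
  have w_eq : Mem.EqOn Vorbis.L.textLo Vorbis.L.textHi u₀.mem v.mem := hcodeok
  have hdf : v.flags .df = false := (show abiInv _ from hinvabi).1
  have hmx : v.mxcsr &&& 0x1F80 = 0x1F80 := (show abiInv _ from hinvabi).2
  have hsse := Vorbis.sseOK_of_abiInv hinvabi
  -- ghosts
  obtain ⟨f, hf⟩ : ∃ f : Nat, (e.reg .rdi).toNat = f := ⟨_, rfl⟩
  obtain ⟨rn, hrn⟩ : ∃ rn : Nat, (e.reg .r8).toNat % 2 ^ 32 = rn := ⟨_, rfl⟩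
  have hgf : g.f = f := by
    unfold G.f
    rw [hge]
    exact hf
  have hgrn : g.rn = rn := by
    unfold G.rn
    rw [hge]
    exact hrn
  have hv : Real.VorbisOK g.len (RunBlk g.A g.len) e.mem f := hf ▸ hpre.vorbis
  have hok : BlkOK (RunBlk g.A g.len) := hpre.env.ok
  have hargs := hpre.args
  rw [hf, hrn] at hargs
  have hR : ResidueOK (RunBlk g.A g.len) e.mem f := hv.residue
  have hrn_lt := hargs.rn_lt
  have hrn64 : rn < 64 := hR.index_lt rn hrn_lt
  -- where `*f` is
  have hob : RunBlk g.A g.len (objBlock f) := hv.obj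
  have hobin := hok.inside _ hob
  have hobst := hpre.free.offStack _ hob
  simp only [vblock, voff] at hobin hobst
  -- the residue record `r = residue_config + 32·rn` (R2)
  obtain ⟨rc, hrc⟩ : ∃ rc : Nat, stb_vorbis.residue_config e.mem f = rc := ⟨_, rfl⟩
  obtain ⟨r, hr⟩ : ∃ r : Nat, rc + 32 * rn = r := ⟨_, rfl⟩
  have hr_at : stb_vorbis.residue_config_at e.mem f rn = r := by
    unfold stb_vorbis.residue_config_at
    rw [hrc]
    simp only [voff]
    exact hr
  have hR1 := hR.R1
  have hR2in := hok.inside _ hR.R2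
  have hR2st := hpre.free.offStack _ hR.R2
  rw [hrc] at hR2in hR2st
  simp only [voff] at hR2in hR2st
  have hrin : 0x100000 ≤ r ∧ r + 32 ≤ 0xC00000 := by omega
  have hrst : r + 32 ≤ 0x700000 ∨ 0x800000 ≤ r := by omega
  clear hR2in hR2st
  have hrec : ResidueAtOK (RunBlk g.A g.len) e.mem f r := hr_at ▸ hR.record rn hrn_lt
  -- the class book `cb = codebooks + 2120·classbook` (CB0, R7)
  obtain ⟨cbk, hcbk⟩ : ∃ x : Nat, Residue.classbook e.mem r = x := ⟨_, rfl⟩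
  obtain ⟨cbs, hcbs⟩ : ∃ x : Nat, stb_vorbis.codebooks e.mem f = x := ⟨_, rfl⟩
  obtain ⟨cb, hcb⟩ : ∃ x : Nat, cbs + 2120 * cbk = x := ⟨_, rfl⟩
  have hcb_at : Residue.cbk e.mem f r = cb := by
    unfold Residue.cbk stb_vorbis.codebooks_at
    rw [hcbk, hcbs]
    simp only [voff]
    exact hcb
  have hR7 := hrec.R7
  rw [hcbk] at hR7
  have hCBin := hok.inside _ hv.config.cb0.F2
  have hCBst := hpre.free.offStack _ hv.config.cb0.F2
  rw [hcbs] at hCBin hCBst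
  simp only [voff] at hCBin hCBst
  have hcbin : 0x100000 ≤ cb ∧ cb + 2120 ≤ 0xC00000 := by omega
  have hcbst : cb + 2120 ≤ 0x700000 ∨ 0x800000 ≤ cb := by omega
  have hcbk256 : cbk < 256 := by
    rw [← hcbk]
    simp only [vacc, voff]
    exact Mem.u8_lt _ _
  clear hCBin hCBst
  -- liveness inside the function: the own frame's objects were added
  have hL' : BlkLive (RunBlk g.A g.len) (Live (stackObjs g.frames' ++ g.others)) := by
    refine BlkLive.mono hpre.env.live ?_
    intro x hx
    obtain ⟨o, ho, hb⟩ := hx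
    exact ⟨o, live_sub_frames' g o ho, hb⟩
  have hl' : LiveIn g.others g.frames' f 1808 := by
    have h := hpre.inv.hand.obj.mono (live_sub_frames' g)
    rw [hf] at h
    simp only [voff] at h
    exact h
  have hstack : Lay.Has (e.reg .rsp - 848) 856 := he_stack
  have hgr : g.r = r := by
    unfold G.r
    rw [hge, hgf, hgrn]
    exact hr_at
  have v_r14' : v.reg .r14 = addr r := by
    rw [v_r14, hgr]
    rfl
  clear v_r14
  -- the dividend and the divisor
  obtain ⟨nr, hnr⟩ : ∃ x : Nat, min (Residue.end_ g.e.mem g.r) (Res.actualDec g.rtype g.n) -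
      min (Residue.begin g.e.mem g.r) (Res.actualDec g.rtype g.n) = x := ⟨_, rfl⟩
  rw [hnr] at v_rbx
  obtain ⟨ps, hps⟩ : ∃ x : Nat, Residue.part_size e.mem r = x := ⟨_, rfl⟩
  have h5 := hrec.R5
  rw [hps] at h5
  have F8 : v.mem.readLE (addr r + 8) 4 = ps := by
    rw [fact_of_addr hsame he_room he_top (n := r + 8) 4 (by rw [show (8 : Word) = UInt64.ofNat 8 from rfl, addr_add]) (by omega) (by omega), ← hps]
    simp only [vacc, voff]
    rfl
  -- the arena fields of `*f` at the entry
  have hado := hpre.ado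
  have hAR1 := hado.ok.AR1
  have hAR2 := hado.ok.AR2
  have hfull := hado.full
  have F84 : v.mem.readLE (e.reg .rdi + 132) 4 = g.A.T := by
    rw [fact_of_addr hsame he_room he_top (n := f + 132) 4 (eq_addr _ _ (by u_omega)) (by omega) (by omega)]
    have h := hado.ok.u32_temp
    rw [hf] at h
    exact h
  have F70 : v.mem.readLE (e.reg .rdi + 112) 8 = g.A.B := by
    rw [fact_of_addr hsame he_room he_top (n := f + 112) 8 (eq_addr _ _ (by u_omega)) (by omega) (by omega)]
    have h := hado.ok.u64_buffer
    rw [hf] at h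
    exact h
  obtain ⟨C, hC⟩ : ∃ x : Nat, nchan e.mem f = x := ⟨_, rfl⟩
  have hHD1 := hv.header.HD1
  have F4 : v.mem.readLE (e.reg .rdi + 4) 4 = C := by
    rw [fact_of_addr hsame he_room he_top (n := f + 4) 4 (eq_addr _ _ (by u_omega)) (by omega) (by omega), ← hC, nchan_def]
    have hc := e.mem.i32_cases (f + 4)
    simp only [vacc, voff] at hHD1 ⊢
    show e.mem.u32 (f + 4) = _
    omega
  u_walk hcode [hμ.vendor] until [atDiv] span [Vorbis.L.textLo, Vorbis.L.textHi] side (first | v_side | (simp only [addr]; v_side))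
  have hd : s_10ed4a.mem.readLE (addr r + 8) 4 = ps := by
    rw [w_mem]
    exact F8
  have hnr32 : nr < 2 ^ 32 := by
    have h4 := hrec.R4
    rw [← hnr, hge, hgr]
    omega
  have hq := udiv32 (Word.part Width.w32 (UInt64.ofNat nr)) (BitVec.ofNat 32 ps) (by rw [BitVec.toNat_ofNat]; omega)
  have hx : (Word.part Width.w32 (UInt64.ofNat nr)).toNat = nr := by
    rw [toNat_part32, UInt64.toNat_ofNat']
    omega
  have hdn : (BitVec.ofNat 32 ps).toNat = ps := by
    rw [BitVec.toNat_ofNat]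
    omega
  rw [hx, hdn] at hq
  u_walk hcode [hμ.vendor] until [Vorbis.L.decode_residue.cut1] span [Vorbis.L.textLo, Vorbis.L.textHi] side (first | v_side | (simp only [addr]; v_side))
  case side_nofault =>
    have hcontra := hopt1.symm.trans hq
    cases hcontra
  case check_10ed68 =>
    have hun : ShadowUntouched v.mem s_10ed68.mem := by v_untouched
    exact hl'.accSmall hshadow hun _ 4 (by decide) (by u_omega) (by u_omega)
  case check_10ed8b =>
    have hun : ShadowUntouched v.mem s_10ed8b.mem := by v_untouched
    exact hl'.accSmall hshadow hun _ 4 (by decide) (by u_omega) (by u_omega)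
  case check_10eda3 =>
    have hun : ShadowUntouched v.mem s_10eda3.mem := by v_untouched
    exact hl'.accSmall hshadow hun _ 8 (by decide) (by u_omega) (by u_omega)
  case call_inv => v_inv
  case pre_10edc5 =>
    have eqr := Option.some.inj (hopt_10ed4f.symm.trans hq)
    have hun : ShadowUntouched v.mem s_10edc5.mem := by v_untouched
    have hrsp8 : (s_10edc5.reg .rsp).toNat + 8 = (e.reg .rsp).toNat - 248 := by
      rw [w_rsp]
      u_omega
    have hsv : Mem.SameExcept [⟨(e.reg .rsp).toNat - 848, (e.reg .rsp).toNat - 152⟩] v.mem s_10edc5.mem := by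
      rw [w_mem]
      u_same
    refine ⟨⟨?_, hpre.shadow.offText⟩, ?_, ?_, hpre.arenaText⟩
    · rw [hrsp8]
      exact hshadow.untouched hun
    · apply ObjLive.of_liveIn
      rw [w_rdi, hf]
      exact hl'
    · rw [w_rdi, hf]
      have h1 : ArenaOK g.A g.others v.mem f := by
        have h0 := hado.ok
        rw [hf] at h0
        refine h0.transfer (objEq_apart hsame hobin.2 ?_ ArenaFields.wins (by decide))
        intro s hs
        simp only [List.mem_cons, List.mem_nil_iff, or_false] at hs
        rcases hs with rfl | rfl
        · simp only []
          omega
        · unfold shadowSpan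
          simp only []
          omega
      refine h1.transfer (objEq_apart hsv hobin.2 ?_ ArenaFields.wins (by decide))
      intro s hs
      simp only [List.mem_cons, List.mem_nil_iff, or_false] at hs
      subst hs
      simp only []
      omega
  case cont =>
    have eqr := Option.some.inj (hopt_10ed4f.symm.trans hq)
    v_after_call w_rsp_10edc5 w_mem_10edc5
    -- the quotient is `part_read`
    have hprd : nr / ps = g.PRD := by
      rw [← hnr, ← hps, ← hgr, ← hge]
      rfl
    have hn4096 : g.n ≤ 4096 := by
      have h1 := hent.args.n_le
      have h2 := hent.vorbis.header.HD3.range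
      have h4 := hent.vorbis.header.HD3.b1_eq
      omega
    have hPRD : g.PRD ≤ 8192 := by
      have h := Residue.partReadDec_le g.e.mem g.f g.rn g.n
      unfold G.PRD
      omega
    have hqv : qr_10ed4f.fst.toNat = g.PRD := by
      rw [eqr]
      show (BitVec.ofNat 32 (nr / ps)).toNat = g.PRD
      rw [hprd, BitVec.toNat_ofNat]
      omega
    have hgC : g.C = C := by
      unfold G.C
      rw [hge, hgf]
      exact hC
    have hC16 : C ≤ 16 := by
      rw [← hC, nchan_def]
      omega
    -- the callee's arguments as numbers: `esi = g.sz`, `rdi = f`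
    have hrsi : (s_10edc5.reg .rsi).toNat % 2 ^ 32 = g.sz := by
      rw [w_rsi_10edc5, hqv, alloc_rsi_val g.PRD C hPRD hC16]
      unfold G.sz
      rw [hgC]
    rw [hrsi, w_rdi_10edc5, hf, hqv] at w_same
    rw [hqv, hf] at w_mem_10edc5
    -- the callee's post: the request fits (T3 + ADO)
    obtain ⟨hfit, hsz8⟩ := alloc_fits hent
    obtain ⟨hrax, hok', hsh'⟩ := w_post.1 (by rw [hrsi]; exact hfit)
    rw [hrsi] at hrax hok' hsh'
    rw [w_rdi_10edc5, hf] at hok'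
    rw [w_rsp_10edc5] at hsh'
    -- the two slots the segment stored into, after the call: the callee's three windows miss the frame
    have hthru : ∀ (a : Word) (n : Nat), (e.reg .rsp).toNat - 248 ≤ a.toNat → a.toNat + n ≤ (e.reg .rsp).toNat →
        s_10edc5r.mem.readLE a n = s_10edc5.mem.readLE a n := by
      intro a n h1 h2
      rw [w_mem_10edc5]
      apply w_same.readLE a n (by omega)
      intro w hw
      simp only [List.mem_cons, List.mem_nil_iff, or_false] at hw
      rcases hw with rfl | rfl | rfl
      · right
        simp only []
        u_omega
      · simp only []
        omega
      · left
        unfold shadowSpan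
        simp only []
        omega
    have hp1 : s_10edc5.mem.readLE (e.reg .rsp - 196) 4 = g.PRD := by
      rw [w_mem_10edc5]
      u_read
    have k_prd : s_10edc5r.mem.readLE (e.reg .rsp - 196) 4 = g.PRD := by
      rw [hthru _ _ (by u_omega) (by u_omega)]
      exact hp1
    have hp2 : s_10edc5.mem.readLE (e.reg .rsp - 184) 8 = f := by
      rw [w_mem_10edc5]
      u_read
    have k_f : UInt64.ofNat (s_10edc5r.mem.readLE (e.reg .rsp - 184) 8) = e.reg .rdi := by
      rw [hthru _ _ (by u_omega) (by u_omega), hp2, ← hf]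
      exact UInt64.ofNat_toNat
    -- everything written since `ret8`
    have hsF : Mem.SameExcept [⟨(e.reg .rsp).toNat - 848, (e.reg .rsp).toNat - 248⟩,
        ⟨(e.reg .rsp).toNat - 196, (e.reg .rsp).toNat - 192⟩, ⟨(e.reg .rsp).toNat - 184, (e.reg .rsp).toNat - 176⟩,
        ⟨f + 132, f + 136⟩,
        shadowSpan (g.A.B + (g.A.T - (r8 g.sz + 32))) (g.A.B + (g.A.T - (r8 g.sz + 32)) + g.sz)] v.mem s_10edc5r.mem := by
      u_same
    -- the registers of the exit assertion
    have hT32 : g.A.T < 2 ^ 32 := by omega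
    have x_rbp : s_10edc5r.reg .rbp = e.reg .rsp - 8 := by
      rw [w_kept .rbp rfl]
      exact v_rbp
    have x_r12 : s_10edc5r.reg .r12 = UInt64.ofNat g.C := by
      rw [w_r12, hgC]
      exact cnt32_ofBV C (by omega)
    have x_r13 : s_10edc5r.reg .r13 = UInt64.ofNat (8 * g.PRD) := by
      rw [w_r13, hqv]
      exact alloc_r13_val g.PRD hPRD
    have x_r14 : s_10edc5r.reg .r14 = UInt64.ofNat g.r := by
      rw [w_kept .r14 rfl, v_r14', hgr]
      rfl
    have x_r15 : s_10edc5r.reg .r15 = UInt64.ofNat g.tap := by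
      rw [w_r15]
      unfold G.tap
      rw [← hfull]
      exact cnt32_ofBV g.A.T hT32
    have x_inv : abiInv s_10edc5r := by v_inv
    have hrsp8 : (e.reg .rsp - 256).toNat + 8 = (e.reg .rsp).toNat - 248 := by u_omega
    rw [hrsp8] at hsh'
    rw [← hgf] at hsF hok'
    refine ReachVia.done ?_
    subst hge
    exact exit_at1d hent hat0 w_rip w_rsp x_rbp hrax x_r12 x_r13 x_r14 x_r15 w_eq x_inv hsF k_prd k_f hok' hsh'




end Vorbis.Spec.decode_residue_1c
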